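-- pv_equiv track=rewrite | github.com/pypi-data/pypi-mirror-287 | packages/maraudersmap/maraudersmap-0.3.0-py3-none-any.whl/maraudersmap/full_graph_actions.py | get_common_root_index
-- ===== SOURCE A (Python) =====
-- def get_common_root_index(list_)-> int:
--     "return the index of the first character differing after a common root"
--     def root_ok(list_, root):
--         for item_ in list_:
--             if item_.startswith(root):
--                 pass
--             else:
--                 return False
--         return True
--
--     one_ = list_[0]
--     idx = 0
--     while root_ok(list_, one_[:idx]):
--         #logger.info(one_[:idx])
--         idx+=1
--     out = idx-1
--
--     # in cas nothing is left for on item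
--     for item in list_:
--         if item[out:] == "":
--             for char in reversed(item):
--                 if char.isalnum():
--                     out-=1
--                 else:
--                     break
--             break
--
--     return out
-- ===== SOURCE B (Python) =====
-- def get_common_root_index(list_) -> int:
--     "return the index of the first character differing after a common root"
--     first = list_[0]
--     out = 0
--     # single column-wise scan: one pass per character column over the list
--     while out < len(first) and all(out < len(it) and it[out] == first[out] for it in list_):
--         out += 1
--     # trim trailing alphanumerics of the item that equals the common root, if any
--     for item in list_:
--         if len(item) == out:
--             k = len(item)
--             while k > 0 and item[k - 1].isalnum():
--                 k -= 1
--             out -= len(item) - k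
--             break
--     return out
-- ===== Notes on version B (the rewrite author's own statement) =====
-- stated objective: alternative
-- what changed: A re-checks the whole growing prefix against every item via startswith on each step (restarting from character 0); B does a single column-wise scan comparing only the current column of every item, and computes the trim by an index countdown instead of reversing the item.
-- outside the precondition, e.g. on get_common_root_index([]): A raises IndexError, B raises IndexError
import Mathlib
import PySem

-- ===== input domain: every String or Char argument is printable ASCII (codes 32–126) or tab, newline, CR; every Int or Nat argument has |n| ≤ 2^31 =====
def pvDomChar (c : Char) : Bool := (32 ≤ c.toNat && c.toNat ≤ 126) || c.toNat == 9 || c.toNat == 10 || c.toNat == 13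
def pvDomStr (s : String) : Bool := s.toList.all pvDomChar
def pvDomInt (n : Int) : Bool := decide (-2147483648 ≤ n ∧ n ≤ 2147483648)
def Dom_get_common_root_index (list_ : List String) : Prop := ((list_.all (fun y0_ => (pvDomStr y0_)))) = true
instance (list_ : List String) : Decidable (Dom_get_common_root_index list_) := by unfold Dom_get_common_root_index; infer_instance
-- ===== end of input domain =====

-- B replaces A's restart-the-whole-prefix-check loop by a single column-wise scan and an index-countdown trim (alternative structure; intended as faster, not confirmed).


-- ===== PORT A =====
-- root_ok(list_, root): for item_ in list_: if item_.startswith(root): pass else: return False; return True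
def pvRootOk (l : List (List Char)) (root : List Char) : Bool :=
  match l with
  | [] => true
  | item_ :: rest => if PySem.Chars.startswith item_ root then pvRootOk rest root else false

-- while root_ok(list_, one_[:idx]): idx += 1   (one_[:idx] = one_.take idx, exact by PySem.List.slice_to_natCast;
-- fuel one_.length + 1 suffices under Pre_, where the loop provably stops at some idx ≤ len(one_))
def pvWhileA (l : List (List Char)) (one_ : List Char) (idx : Nat) : Nat → Nat
  | 0 => idx
  | fuel + 1 => if pvRootOk l (one_.take idx) then pvWhileA l one_ (idx + 1) fuel else idx

-- for char in reversed(item): if char.isalnum(): out -= 1 else: break   (applied to item.reverse)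
def pvTrimA (ds : List Char) (out : Int) : Int :=
  match ds with
  | [] => out
  | c :: rest => if PySem.Chars.isalnum c then pvTrimA rest (out - 1) else out

-- for item in list_: if item[out:] == "": <trim>; break
def pvFindTrimA (l : List (List Char)) (out : Int) : Int :=
  match l with
  | [] => out
  | item :: rest =>
      if PySem.List.slice item (some out) none = ([] : List Char) then pvTrimA item.reverse out
      else pvFindTrimA rest out

def get_common_root_index (list_ : List String) : Int :=
  let l := list_.map String.toList
  let one_ := (PySem.List.pyGet? l 0).getD []   -- list_[0]; none = IndexError, excluded by Pre_
  let idx := pvWhileA l one_ 0 (one_.length + 1)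
  let out : Int := (idx : Int) - 1
  pvFindTrimA l out

-- ===== PORT B =====
-- all(out < len(it) and it[out] == first[out] for it in list_)
def pvColOk (l : List (List Char)) (first : List Char) (out : Nat) : Bool :=
  l.all (fun it => decide (out < it.length) && (it.getD out ' ' == first.getD out ' '))

-- while out < len(first) and all(...): out += 1
def pvScanB (l : List (List Char)) (first : List Char) (out : Nat) : Nat :=
  if h : out < first.length ∧ pvColOk l first out = true then pvScanB l first (out + 1) else out
  termination_by first.length - out
  decreasing_by omega

-- while k > 0 and item[k-1].isalnum(): k -= 1
def pvTrimB (item : List Char) : Nat → Nat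
  | 0 => 0
  | k + 1 => if PySem.Chars.isalnum (item.getD k ' ') then pvTrimB item k else k + 1

-- for item in list_: if len(item) == out: ...; break
def pvFindTrimB (l : List (List Char)) (out : Nat) : Int :=
  match l with
  | [] => (out : Int)
  | item :: rest =>
      if item.length = out then
        (out : Int) - ((item.length : Int) - (pvTrimB item item.length : Int))
      else pvFindTrimB rest out

def get_common_root_index_alt (list_ : List String) : Int :=
  let l := list_.map String.toList
  let first := (PySem.List.pyGet? l 0).getD []   -- list_[0]; none = IndexError, excluded by Pre_
  let out := pvScanB l first 0
  pvFindTrimB l out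

-- ===== PRECONDITION & SPEC =====
-- Pre_ excludes [] (list_[0] raises IndexError) and lists whose every item starts with list_[0]
-- (there A's while loop never ends: one_[:idx] stays one_ once idx ≥ len(one_), so A diverges and returns nothing).
def Pre_get_common_root_index (list_ : List String) : Prop :=
  list_ ≠ [] ∧ ¬ (∀ it ∈ list_, PySem.Str.startswith it (list_.headD "") = true)
instance (list_ : List String) : Decidable (Pre_get_common_root_index list_) := by
  unfold Pre_get_common_root_index; infer_instance

def pvWitness_get_common_root_index : List String := ["abc", "abd"]

def Spec_get_common_root_index (list_ : List String) (out : Int) : Prop := out = get_common_root_index_alt list_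
instance (list_ : List String) (out : Int) : Decidable (Spec_get_common_root_index list_ out) := by
  unfold Spec_get_common_root_index; infer_instance

-- ===== CLAIM (what is proved, stated in full; the proofs are below) =====
def Claim_equal_get_common_root_index : Prop := ∀ (list_ : List String), Dom_get_common_root_index list_ → Pre_get_common_root_index list_ → Spec_get_common_root_index list_ (get_common_root_index list_)

-- ===== LEMMAS AND PROOFS =====

theorem pvRootOk_eq_all (l : List (List Char)) (root : List Char) :
    pvRootOk l root = l.all (fun it => PySem.Chars.startswith it root) := by
  induction l with
  | nil => rfl
  | cons a t ih =>
    simp only [pvRootOk, List.all_cons, ih]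
    split_ifs with h <;> simp [h]

theorem pvRootOk_iff (l : List (List Char)) (root : List Char) :
    pvRootOk l root = true ↔ ∀ it ∈ l, root <+: it := by
  simp [pvRootOk_eq_all, List.all_eq_true, PySem.Chars.startswith_iff]


-- per item: carrying the (k+1)-prefix of first = carrying the k-prefix and matching in column k
theorem pvPrefix_succ_iff (first it : List Char) (k : Nat) (hk : k < first.length) :
    first.take (k + 1) <+: it ↔
      first.take k <+: it ∧ k < it.length ∧ it.getD k ' ' = first.getD k ' ' := by
  by_cases hit : k < it.length
  · rw [List.prefix_iff_eq_take, List.prefix_iff_eq_take]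
    rw [List.length_take, List.length_take, Nat.min_eq_left (by omega), Nat.min_eq_left (by omega)]
    rw [List.take_succ_eq_append_getElem hk, List.take_succ_eq_append_getElem hit]
    rw [List.getD_eq_getElem _ _ hit, List.getD_eq_getElem _ _ hk]
    constructor
    · intro h
      have := List.append_inj h (by simp [List.length_take]; omega)
      simp at this
      exact ⟨this.1, hit, this.2.symm⟩
    · rintro ⟨h1, -, h2⟩
      rw [h1, h2]
  · constructor
    · intro h
      have := h.length_le
      rw [List.length_take, Nat.min_eq_left (by omega)] at this
      omega
    · rintro ⟨-, h, -⟩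
      omega

theorem pvColOk_iff (l : List (List Char)) (first : List Char) (k : Nat) :
    pvColOk l first k = true ↔ ∀ it ∈ l, k < it.length ∧ it.getD k ' ' = first.getD k ' ' := by
  simp [pvColOk, List.all_eq_true]

-- one column: all items carry the (k+1)-prefix of first ↔ they carry the k-prefix and column k matches
theorem pvCol_step (l : List (List Char)) (first : List Char) (k : Nat) (hk : k < first.length) :
    (∀ it ∈ l, first.take (k + 1) <+: it) ↔
      (∀ it ∈ l, first.take k <+: it) ∧ pvColOk l first k = true := by
  rw [pvColOk_iff]
  constructor
  · intro h
    exact ⟨fun it hit => ((pvPrefix_succ_iff first it k hk).mp (h it hit)).1,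
           fun it hit => ((pvPrefix_succ_iff first it k hk).mp (h it hit)).2⟩
  · rintro ⟨h1, h2⟩ it hit
    exact (pvPrefix_succ_iff first it k hk).mpr ⟨h1 it hit, h2 it hit⟩

-- the two loops agree: A's while loop stops exactly one past B's column scan
theorem pvLoop_eq (l : List (List Char)) (first : List Char)
    (hpre : ¬ ∀ it ∈ l, first <+: it) :
    ∀ fuel k, k ≤ first.length → fuel = first.length + 1 - k →
      (∀ it ∈ l, first.take k <+: it) →
      pvWhileA l first k fuel = pvScanB l first k + 1 := by
  intro fuel
  induction fuel with
  | zero => intro k hk hf hinv; omega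
  | succ fuel ih =>
    intro k hk hf hinv
    have hklt : k < first.length := by
      rcases Nat.lt_or_ge k first.length with h | h
      · exact h
      · exfalso
        apply hpre
        intro it hit
        have := hinv it hit
        rwa [List.take_of_length_le (by omega)] at this
    have hok : pvRootOk l (first.take k) = true := (pvRootOk_iff l _).mpr hinv
    rw [pvWhileA, if_pos hok, pvScanB]
    by_cases hcol : pvColOk l first k = true
    · rw [dif_pos ⟨hklt, hcol⟩]
      exact ih (k + 1) (by omega) (by omega)
        ((pvCol_step l first k hklt).mpr ⟨hinv, hcol⟩)
    · rw [dif_neg (by tauto)]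
      have hnot : pvRootOk l (first.take (k + 1)) ≠ true := by
        intro h
        rw [pvRootOk_iff] at h
        exact hcol ((pvCol_step l first k hklt).mp h).2
      cases fuel with
      | zero => omega
      | succ f => rw [pvWhileA, if_neg hnot]

-- B's scan keeps the prefix invariant and stays within first
theorem pvScanB_inv (l : List (List Char)) (first : List Char) :
    ∀ n k, n = first.length - k → k ≤ first.length → (∀ it ∈ l, first.take k <+: it) →
      (∀ it ∈ l, first.take (pvScanB l first k) <+: it) ∧ pvScanB l first k ≤ first.length := by
  intro n
  induction n with
  | zero =>
    intro k hn hk hinv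
    rw [pvScanB, dif_neg (by omega)]
    exact ⟨hinv, hk⟩
  | succ n ih =>
    intro k hn hk hinv
    rw [pvScanB]
    by_cases hc : k < first.length ∧ pvColOk l first k = true
    · rw [dif_pos hc]
      exact ih (k + 1) (by omega) (by omega)
        ((pvCol_step l first k hc.1).mpr ⟨hinv, hc.2⟩)
    · rw [dif_neg hc]
      exact ⟨hinv, hk⟩

-- A-side trim counts the trailing alphanumeric run (as takeWhile on the reversed item)
theorem pvTrimA_eq (ds : List Char) (out : Int) :
    pvTrimA ds out = out - ((ds.takeWhile PySem.Chars.isalnum).length : Int) := by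
  induction ds generalizing out with
  | nil => simp [pvTrimA]
  | cons c rest ih =>
    simp only [pvTrimA, List.takeWhile_cons]
    split_ifs with h
    · rw [ih]; simp; omega
    · simp

-- B-side trim computes length minus the same trailing run
theorem pvTrimB_eq (item : List Char) :
    ∀ k, k ≤ item.length →
      pvTrimB item k = k - ((item.take k).reverse.takeWhile PySem.Chars.isalnum).length := by
  intro k
  induction k with
  | zero => simp [pvTrimB]
  | succ k ih =>
    intro hk
    have hk' : k < item.length := by omega
    have : (item.take (k + 1)).reverse = item[k] :: (item.take k).reverse := by
      rw [List.take_succ_eq_append_getElem hk', List.reverse_append]; simp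
    simp only [pvTrimB, this, List.takeWhile_cons]
    have hget : item.getD k ' ' = item[k] := by simp [List.getD_eq_getElem?_getD, List.getElem?_eq_getElem hk']
    have htw : ((item.take k).reverse.takeWhile PySem.Chars.isalnum).length ≤ k := by
      calc _ ≤ (item.take k).reverse.length := (List.takeWhile_sublist _).length_le
        _ ≤ k := by simp
    rw [hget]
    split_ifs with h
    · rw [List.length_cons, ih (by omega)]
      omega
    · simp

-- the trim passes agree when every item is at least out long
theorem pvFindTrim_eq (l : List (List Char)) (out : Nat)
    (hlen : ∀ it ∈ l, out ≤ it.length) :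
    pvFindTrimA l (out : Int) = pvFindTrimB l out := by
  induction l with
  | nil => rfl
  | cons item rest ih =>
    have hlen' := hlen item (by simp)
    have hslice : PySem.List.slice item (some (out : Int)) none = item.drop out :=
      PySem.List.slice_from_natCast item out
    simp only [pvFindTrimA, pvFindTrimB, hslice]
    by_cases h : item.length = out
    · rw [if_pos (by rw [List.drop_eq_nil_iff]; omega), if_pos h]
      rw [pvTrimA_eq, pvTrimB_eq item item.length (le_refl _)]
      have htw : (item.reverse.takeWhile PySem.Chars.isalnum).length ≤ item.length := by
        calc _ ≤ item.reverse.length := (List.takeWhile_sublist _).length_le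
          _ = item.length := by simp
      simp
      omega
    · rw [if_neg (by rw [List.drop_eq_nil_iff]; omega), if_neg h]
      exact ih (fun it hit => hlen it (by simp [hit]))

-- ===== VERDICT (by name: the statement is the Claim_ definition above) =====
theorem get_common_root_index_spec : Claim_equal_get_common_root_index := by
  intro list_ _ hpre
  unfold Spec_get_common_root_index
  obtain ⟨hne, hnp⟩ := hpre
  obtain ⟨s, rest, rfl⟩ : ∃ s rest, list_ = s :: rest := by
    cases list_ with
    | nil => exact absurd rfl hne
    | cons s rest => exact ⟨s, rest, rfl⟩
  have hget0 : (PySem.List.pyGet? (s.toList :: List.map String.toList rest) 0).getD [] = s.toList := by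
    simp [pysem]
  simp only [get_common_root_index, get_common_root_index_alt, List.map_cons, hget0]
  set l := s.toList :: List.map String.toList rest with hl
  set first := s.toList with hfst
  have hpre' : ¬ ∀ it ∈ l, first <+: it := by
    intro h
    apply hnp
    intro it hit
    have hmem : it.toList ∈ l := by
      rw [List.mem_cons] at hit
      rcases hit with rfl | hit
      · exact List.mem_cons_self
      · exact List.mem_cons_of_mem _ (List.mem_map_of_mem hit)
    have h3 := h it.toList hmem
    simp only [List.headD_cons]
    simpa [PySem.Chars.startswith_iff] using h3
  have hinv0 : ∀ it ∈ l, first.take 0 <+: it := by simp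
  have hloop := pvLoop_eq l first hpre' (first.length + 1) 0 (by omega) (by omega) hinv0
  rw [hloop]
  have hscan := pvScanB_inv l first first.length 0 rfl (by omega) hinv0
  have hlen : ∀ it ∈ l, pvScanB l first 0 ≤ it.length := by
    intro it hit
    have hle := (hscan.1 it hit).length_le
    rwa [List.length_take, Nat.min_eq_left hscan.2] at hle
  have hcast : ((pvScanB l first 0 + 1 : Nat) : Int) - 1 = ((pvScanB l first 0 : Nat) : Int) := by
    push_cast; ring
  rw [hcast]
  exact pvFindTrim_eq l _ hlen
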